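-- pv_equiv track=rewrite | github.com/DevJ2K/bsq_in_python | is_valid.py | info_is_valid
-- ===== SOURCE A (Python) =====
-- def info_is_valid(info):
-- 	nbr_lines = ""
-- 	authorized_char = ""
-- 	for i in info:
-- 		if i in "0123456789":
-- 			nbr_lines += i
-- 		else:
-- 			authorized_char += i
-- 	try:
-- 		dico = {
-- 			"nbr_lines": int(nbr_lines),
-- 			"empty": authorized_char[0],
-- 			"obstacle": authorized_char[1],
-- 			"full": authorized_char[2]
-- 		}
-- 		return True
-- 	except:
-- 		return False
-- ===== SOURCE B (Python) =====
-- def info_is_valid(info):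
-- 	digits = 0
-- 	others = 0
-- 	for c in info:
-- 		if c in "0123456789":
-- 			digits += 1
-- 		else:
-- 			others += 1
-- 	return digits >= 1 and others >= 3
-- ===== Notes on version B (the rewrite author's own statement) =====
-- stated objective: simpler
-- what changed: B replaces A's two accumulated strings, dict construction and try/except with two integer counters and a direct comparison (at least one digit and at least three other characters).
import Mathlib
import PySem

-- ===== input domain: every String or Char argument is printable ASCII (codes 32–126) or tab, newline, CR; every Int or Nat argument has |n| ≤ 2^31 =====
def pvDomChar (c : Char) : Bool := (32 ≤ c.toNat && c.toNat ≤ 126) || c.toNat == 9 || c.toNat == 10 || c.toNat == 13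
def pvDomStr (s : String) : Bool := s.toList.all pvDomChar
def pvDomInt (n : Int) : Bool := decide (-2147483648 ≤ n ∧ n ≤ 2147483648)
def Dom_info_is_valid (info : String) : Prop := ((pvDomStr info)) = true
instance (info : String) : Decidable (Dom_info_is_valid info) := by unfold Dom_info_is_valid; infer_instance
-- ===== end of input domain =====

-- B replaces A's two accumulated strings, dict build and try/except with two
-- integer counters and a direct "digits >= 1 and others >= 3" test (simpler).


-- ===== PORT A =====
-- int(s) ported by hand: at A's single call site the argument is nbr_lines, which A's
-- loop builds exclusively from characters of "0123456789"; on such digit-only strings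
-- int(s) is exactly "ValueError (none) on the empty string, else the decimal value".
def pvIntOfDigits? (l : List Char) : Option Int :=
  if l.isEmpty then none
  else some (l.foldl (fun a c => a * 10 + ((c.toNat : Int) - 48)) 0)

-- Python `i in "0123456789"` is a substring test; for the single character i it is
-- exactly char membership.
def info_is_valid (info : String) : Bool :=
  let st := info.toList.foldl
    (fun (acc : List Char × List Char) i =>
      if "0123456789".toList.contains i then (acc.1 ++ [i], acc.2)
      else (acc.1, acc.2 ++ [i]))
    ([], [])
  -- try: int(nbr_lines); authorized_char[0]; authorized_char[1]; authorized_char[2]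
  -- → True unless any step raises (bare except → False)
  match pvIntOfDigits? st.1, PySem.List.pyGet? st.2 0,
        PySem.List.pyGet? st.2 1, PySem.List.pyGet? st.2 2 with
  | some _, some _, some _, some _ => true
  | _, _, _, _ => false

-- ===== PORT B =====
def info_is_valid_alt (info : String) : Bool :=
  let st := info.toList.foldl
    (fun (acc : Int × Int) c =>
      if "0123456789".toList.contains c then (acc.1 + 1, acc.2)
      else (acc.1, acc.2 + 1))
    (0, 0)
  decide (1 ≤ st.1) && decide (3 ≤ st.2)

-- ===== PRECONDITION & SPEC =====
def Spec_info_is_valid (info : String) (out : Bool) : Prop := out = info_is_valid_alt info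
instance (info : String) (out : Bool) : Decidable (Spec_info_is_valid info out) := by unfold Spec_info_is_valid; infer_instance

-- ===== CLAIM (what is proved, stated in full; the proofs are below) =====
def Claim_equal_info_is_valid : Prop := ∀ (info : String), Dom_info_is_valid info → Spec_info_is_valid info (info_is_valid info)

-- ===== LEMMAS AND PROOFS =====

-- Loop invariant: B's counters are exactly the lengths of A's accumulated lists.
theorem pv_fold_inv (l : List Char) (d o : List Char) :
    (l.foldl
      (fun (acc : Int × Int) c =>
        if "0123456789".toList.contains c then (acc.1 + 1, acc.2)
        else (acc.1, acc.2 + 1))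
      ((d.length : Int), (o.length : Int)))
    = (((l.foldl
          (fun (acc : List Char × List Char) i =>
            if "0123456789".toList.contains i then (acc.1 ++ [i], acc.2)
            else (acc.1, acc.2 ++ [i]))
          (d, o)).1.length : Int),
       ((l.foldl
          (fun (acc : List Char × List Char) i =>
            if "0123456789".toList.contains i then (acc.1 ++ [i], acc.2)
            else (acc.1, acc.2 ++ [i]))
          (d, o)).2.length : Int)) := by
  induction l generalizing d o with
  | nil => simp
  | cons c t ih =>
    simp only [List.foldl_cons]
    by_cases h : "0123456789".toList.contains c = true
    · rw [if_pos h, if_pos h]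
      have := ih (d ++ [c]) o
      simp only [List.length_append, List.length_cons, List.length_nil,
        Nat.cast_add, Nat.cast_one] at this
      simpa using this
    · rw [if_neg h, if_neg h]
      have := ih d (o ++ [c])
      simp only [List.length_append, List.length_cons, List.length_nil,
        Nat.cast_add, Nat.cast_one] at this
      simpa using this

theorem info_is_valid_spec : Claim_equal_info_is_valid := by
  unfold Claim_equal_info_is_valid
  intro info _
  unfold Spec_info_is_valid info_is_valid info_is_valid_alt
  have h := pv_fold_inv info.toList [] []
  simp only [List.length_nil, Nat.cast_zero] at h
  rw [h]
  set sa := info.toList.foldl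
      (fun (acc : List Char × List Char) i =>
        if "0123456789".toList.contains i then (acc.1 ++ [i], acc.2)
        else (acc.1, acc.2 ++ [i]))
      ([], []) with hsa
  rcases sa with ⟨ds, os⟩
  have h1 : PySem.List.pyGet? os 1 = os[(1:Nat)]? := by
    rw [PySem.List.pyGet?_of_nonneg os (by norm_num)]; rfl
  have h2 : PySem.List.pyGet? os 2 = os[(2:Nat)]? := by
    rw [PySem.List.pyGet?_of_nonneg os (by norm_num)]; rfl
  dsimp only
  rw [PySem.List.pyGet?_zero, h1, h2, Bool.eq_iff_iff]
  split
  · rename_i v a0 a1 a2 hv h0 hh1 hh2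
    have hlen : 2 < os.length := by
      by_contra hc
      rw [List.getElem?_eq_none (by omega)] at hh2
      simp at hh2
    have hne : ds ≠ [] := by
      intro he
      rw [he] at hv
      simp [pvIntOfDigits?] at hv
    have hdl : 1 ≤ ds.length := List.length_pos_iff.mpr hne
    simp only [Bool.and_eq_true, decide_eq_true_eq]
    constructor
    · intro _; omega
    · intro _; trivial
  · rename_i hnm
    constructor
    · intro hfalse; exact absurd hfalse (by simp)
    intro hb
    exfalso
    simp only [Bool.and_eq_true, decide_eq_true_eq] at hb
    obtain ⟨hb1, hb2⟩ := hb
    have hne : ds ≠ [] := by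
      intro he; rw [he] at hb1; simp at hb1
    have hos : 2 < os.length := by omega
    rcases hv : pvIntOfDigits? ds with _ | v
    · rw [pvIntOfDigits?] at hv
      rw [if_neg (by simpa using hne)] at hv
      simp at hv
    · rcases hg0 : os[(0:Nat)]? with _ | a0
      · rw [List.getElem?_eq_none_iff] at hg0; omega
      · rcases hg1 : os[(1:Nat)]? with _ | a1
        · rw [List.getElem?_eq_none_iff] at hg1; omega
        · rcases hg2 : os[(2:Nat)]? with _ | a2
          · rw [List.getElem?_eq_none_iff] at hg2; omega
          · exact hnm v a0 a1 a2 hv (by rw [hg0]) (by rw [hg1]) (by rw [hg2])
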